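-- pv_equiv track=rewrite | github.com/ToebagusFarhan/webcrypto | app/controller/cipher/playfair.py | prepare_key_bytes
-- ===== SOURCE A (Python) =====
-- def prepare_key_bytes(key: str) -> list:
--     key_bytes = []
--     seen = set()
--     for char in key.encode('latin-1'):
--         if char not in seen:
--             seen.add(char)
--             key_bytes.append(char)
--     for i in range(256):
--         if i not in seen:
--             key_bytes.append(i)
--     matrix = [key_bytes[i:i+16] for i in range(0, 256, 16)]  # 16x16 grid for byte values
--     return matrix
-- ===== SOURCE B (Python) =====
-- def prepare_key_bytes(key: str) -> list:
--     # rank every byte value 0..255 by its first-occurrence index in the key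
--     # (values absent from the key rank after all key bytes, in ascending order),
--     # then a single stable sort of range(256) by that rank yields the flat table.
--     k = list(key.encode('latin-1'))
--     rank = lambda v: k.index(v) if v in k else len(k) + v
--     flat = sorted(range(256), key=rank)
--     return [flat[r*16:(r+1)*16] for r in range(16)]
-- ===== Notes on version B (the rewrite author's own statement) =====
-- stated objective: alternative
-- what changed: Instead of A's two guarded appending loops (dedup the key bytes with a seen-set, then scan 0..255 filling in unseen values), B defines a rank function on byte values (first-occurrence index in the key; values absent from the key rank after all key bytes, in ascending order) and produces the flat table by a single stable sort of range(256) by that rank, then chunks it into 16 rows.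
import Mathlib
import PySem

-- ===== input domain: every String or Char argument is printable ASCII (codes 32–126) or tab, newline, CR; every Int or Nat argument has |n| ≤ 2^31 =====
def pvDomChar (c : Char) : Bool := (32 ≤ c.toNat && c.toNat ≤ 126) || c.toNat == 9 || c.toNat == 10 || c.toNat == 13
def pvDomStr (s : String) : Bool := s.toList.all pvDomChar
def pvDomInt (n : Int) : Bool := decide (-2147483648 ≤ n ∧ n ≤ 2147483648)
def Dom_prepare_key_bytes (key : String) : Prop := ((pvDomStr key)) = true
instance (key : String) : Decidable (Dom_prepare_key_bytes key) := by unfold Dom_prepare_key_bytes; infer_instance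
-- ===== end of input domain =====

-- B replaces A's two guarded appending loops with a rank function (first-occurrence
-- index in the key, absent values after all key bytes in ascending order) and one
-- stable sort of range(256) by that rank: a different algorithm, same cost class.

-- ===== PORT A =====
def prepare_key_bytes (key : String) : List (List Int) :=
  -- key.encode('latin-1'): on the ASCII domain each char code is its byte
  let kbytes : List Int := key.toList.map (fun c => (c.toNat : Int))
  -- first loop: (seen, key_bytes) over the key bytes
  let st : PySem.Set Int × List Int := kbytes.foldl
    (fun (st : PySem.Set Int × List Int) ch =>
      if PySem.Set.contains st.1 ch then st
      else (PySem.Set.add st.1 ch, st.2 ++ [ch]))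
    (PySem.Set.empty, [])
  -- second loop: for i in range(256): if i not in seen: append
  let key_bytes : List Int := (PySem.List.pyRange 0 256 1).foldl
    (fun acc i => if PySem.Set.contains st.1 i then acc else acc ++ [i]) st.2
  (PySem.List.pyRange 0 256 16).map
    (fun i => PySem.List.slice key_bytes (some i) (some (i + 16)))

-- ===== PORT B =====
def prepare_key_bytes_alt (key : String) : List (List Int) :=
  -- k = list(key.encode('latin-1'))  (ASCII domain: each char code is its byte)
  let k : List Int := key.toList.map (fun c => (c.toNat : Int))
  -- rank = lambda v: k.index(v) if v in k else len(k) + v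
  -- (k.index(v) is guarded by 'v in k', so index? is some there; getD 0 is never the default)
  let rank : Int → Int := fun v =>
    if k.contains v then ((PySem.List.index? k v).getD 0 : Int)
    else (k.length : Int) + v
  -- flat = sorted(range(256), key=rank)
  let flat : List Int := PySem.List.sorted (PySem.List.pyRange 0 256 1) rank
  -- [flat[r*16:(r+1)*16] for r in range(16)]
  (PySem.List.pyRange 0 16 1).map
    (fun r => PySem.List.slice flat (some (r * 16)) (some (r * 16 + 16)))

-- ===== PRECONDITION & SPEC =====
def Spec_prepare_key_bytes (key : String) (out : List (List Int)) : Prop := out = prepare_key_bytes_alt key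
instance (key : String) (out : List (List Int)) : Decidable (Spec_prepare_key_bytes key out) := by unfold Spec_prepare_key_bytes; infer_instance

-- ===== CLAIM (what is proved, stated in full; the proofs are below) =====
def Claim_equal_prepare_key_bytes : Prop := ∀ (key : String), Dom_prepare_key_bytes key → Spec_prepare_key_bytes key (prepare_key_bytes key)

-- ===== LEMMAS AND PROOFS =====

-- A's first loop from state (s, s) keeps both components equal: it is s.update(l) twice.
theorem pv_loop1 (l : List Int) (s : PySem.Set Int) :
    l.foldl (fun (st : PySem.Set Int × List Int) ch =>
        if PySem.Set.contains st.1 ch then st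
        else (PySem.Set.add st.1 ch, st.2 ++ [ch])) (s, s)
      = (PySem.Set.update s l, PySem.Set.update s l) := by
  induction l generalizing s with
  | nil => simp [PySem.Set.update]
  | cons a l ih =>
    rw [List.foldl_cons, PySem.Set.update_cons]
    by_cases h : a ∈ s
    · have hc : PySem.Set.contains s a = true := (PySem.Set.contains_iff s a).mpr h
      simp only [hc, if_true, PySem.Set.add_of_mem h]
      exact ih s
    · have hc : PySem.Set.contains s a = false := by
        cases hb : PySem.Set.contains s a
        · rfl
        · exact absurd ((PySem.Set.contains_iff s a).mp hb) h
      simp only [hc, Bool.false_eq_true, if_false]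
      rw [PySem.Set.add_of_not_mem h]
      exact ih (s ++ [a])

-- A's second loop appends exactly the unseen elements, in order.
theorem pv_loop2 (r s acc : List Int) :
    r.foldl (fun acc i => if PySem.Set.contains s i then acc else acc ++ [i]) acc
      = acc ++ r.filter (fun i => !PySem.Set.contains s i) := by
  have hf : (fun (acc : List Int) i => if PySem.Set.contains s i then acc else acc ++ [i])
      = (fun acc i => if !PySem.Set.contains s i then acc ++ [i] else acc) := by
    funext acc i
    cases PySem.Set.contains s i <;> simp
  rw [hf, PySem.List.foldl_append_if_eq_filter]

-- A's flat 256-list is the ordered dedup of key bytes ++ range(256).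
theorem pv_flat_eq (b : List Int) :
    (PySem.List.pyRange 0 256 1).foldl
      (fun acc i =>
        if PySem.Set.contains
            (b.foldl (fun (st : PySem.Set Int × List Int) ch =>
              if PySem.Set.contains st.1 ch then st
              else (PySem.Set.add st.1 ch, st.2 ++ [ch])) (PySem.Set.empty, [])).1 i
        then acc else acc ++ [i])
      (b.foldl (fun (st : PySem.Set Int × List Int) ch =>
        if PySem.Set.contains st.1 ch then st
        else (PySem.Set.add st.1 ch, st.2 ++ [ch])) (PySem.Set.empty, [])).2
      = PySem.List.dedup (b ++ PySem.List.pyRange 0 256 1) := by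
  have h0 : (PySem.Set.empty : PySem.Set Int) = ([] : List Int) := rfl
  have h1 := pv_loop1 b ([] : PySem.Set Int)
  have hupd : PySem.Set.update ([] : PySem.Set Int) b = PySem.Set.ofList b :=
    PySem.Set.update_nil_left b
  simp only [h0, h1, hupd]
  rw [pv_loop2]
  rw [PySem.List.dedup_eq_ofList, PySem.Set.ofList_append,
      PySem.Set.update_eq_append_filter]
  have hr : PySem.Set.ofList (PySem.List.pyRange 0 256 1) = PySem.List.pyRange 0 256 1 :=
    PySem.Set.ofList_eq_self_of_nodup _ (PySem.List.nodup_pyRange_one 0 256)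
  rw [hr]

-- guarded k.index(v): the Option really is some (idxOf v k)
theorem pv_idxOf?_eq (v : Int) (k : List Int) (h : v ∈ k) :
    List.idxOf? v k = some (List.idxOf v k) := by
  induction k with
  | nil => simp at h
  | cons a t ih =>
    by_cases hv : v = a
    · simp [List.idxOf?_cons, hv]
    · rcases List.mem_cons.mp h with h1 | h2
      · exact absurd h1 hv
      · simp [List.idxOf?_cons, Ne.symm hv, ih h2, Option.map_some]

-- ordered dedup lists its elements in order of first occurrence
theorem pv_dedup_pairwise_idxOf (l : List Int) :
    (PySem.List.dedup l).Pairwise (fun a b => List.idxOf a l < List.idxOf b l) := by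
  induction l using List.reverseRecOn with
  | nil => simp [PySem.List.dedup]
  | append_singleton l x ih =>
    have hded : PySem.List.dedup (l ++ [x]) = PySem.Set.add (PySem.List.dedup l) x := by
      rw [PySem.List.dedup_eq_ofList, PySem.Set.ofList_append, PySem.List.dedup_eq_ofList]
      rfl
    by_cases hx : x ∈ l
    · have hxd : x ∈ PySem.List.dedup l := (PySem.List.mem_dedup l x).mpr hx
      rw [hded, PySem.Set.add_of_mem hxd]
      refine ih.imp_of_mem ?_
      intro a b ha hb hab
      have ha' := (PySem.List.mem_dedup l a).mp ha
      have hb' := (PySem.List.mem_dedup l b).mp hb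
      rwa [List.idxOf_append, if_pos ha', List.idxOf_append, if_pos hb']
    · have hxd : x ∉ PySem.List.dedup l := fun h => hx ((PySem.List.mem_dedup l x).mp h)
      rw [hded, PySem.Set.add_of_not_mem hxd, List.pairwise_append]
      refine ⟨?_, by simp, ?_⟩
      · refine ih.imp_of_mem ?_
        intro a b ha hb hab
        have ha' := (PySem.List.mem_dedup l a).mp ha
        have hb' := (PySem.List.mem_dedup l b).mp hb
        rwa [List.idxOf_append, if_pos ha', List.idxOf_append, if_pos hb']
      · intro a ha b hb
        have ha' := (PySem.List.mem_dedup l a).mp ha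
        have hb' : b = x := by simpa using hb
        subst hb'
        rw [List.idxOf_append, if_pos ha', List.idxOf_append, if_neg hx]
        have := List.idxOf_lt_length_of_mem ha'
        simp
        omega

-- position of v in range(256)
theorem pv_idxOf_pyRange (v : Int) (h0 : 0 ≤ v) (h1 : v < 256) :
    List.idxOf v (PySem.List.pyRange 0 256 1) = v.toNat := by
  have hr : PySem.List.pyRange 0 256 1 = List.map (fun k : Nat => (k : Int)) (List.range 256) := by
    have := PySem.List.pyRange_zero_natCast 256
    norm_num at this ⊢
    exact this
  have hn : (PySem.List.pyRange 0 256 1).Nodup := PySem.List.nodup_pyRange_one 0 256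
  have hlt : v.toNat < (PySem.List.pyRange 0 256 1).length := by
    rw [hr]; simp; omega
  have hget : (PySem.List.pyRange 0 256 1)[v.toNat] = v := by
    simp only [hr, List.getElem_map, List.getElem_range]
    exact Int.toNat_of_nonneg h0
  have := List.Nodup.idxOf_getElem hn v.toNat hlt
  rwa [hget] at this

-- B's rank is exactly the first-occurrence index in key bytes ++ range(256)
theorem pv_rank_eq (k : List Int) (v : Int) (hv0 : 0 ≤ v) (hv1 : v < 256) :
    (if k.contains v then ((PySem.List.index? k v).getD 0 : Int)
     else (k.length : Int) + v)
      = (List.idxOf v (k ++ PySem.List.pyRange 0 256 1) : Int) := by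
  by_cases h : v ∈ k
  · rw [if_pos (by simpa using h)]
    show ((List.idxOf? v k).getD 0 : Int) = _
    rw [pv_idxOf?_eq v k h, Option.getD_some, List.idxOf_append, if_pos h]
  · rw [if_neg (by simpa using h)]
    rw [List.idxOf_append, if_neg h, pv_idxOf_pyRange v hv0 hv1]
    push_cast
    omega

-- B's sort equals A's dedup-of-concatenation
theorem pv_sorted_eq (k : List Int) (hk : ∀ x ∈ k, 0 ≤ x ∧ x < 256) :
    PySem.List.sorted (PySem.List.pyRange 0 256 1)
      (fun v => if k.contains v then ((PySem.List.index? k v).getD 0 : Int)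
                else (k.length : Int) + v)
      = PySem.List.dedup (k ++ PySem.List.pyRange 0 256 1) := by
  have hmemr : ∀ x ∈ PySem.List.dedup (k ++ PySem.List.pyRange 0 256 1),
      0 ≤ x ∧ x < 256 := by
    intro x hx
    rcases List.mem_append.mp ((PySem.List.mem_dedup _ x).mp hx) with h | h
    · exact hk x h
    · exact PySem.List.mem_pyRange_one.mp h
  apply PySem.List.sorted_eq_of_perm_of_pairwise_lt
  · refine (List.perm_ext_iff_of_nodup (PySem.List.nodup_dedup _)
      (PySem.List.nodup_pyRange_one 0 256)).mpr ?_
    intro x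
    rw [PySem.List.mem_dedup, List.mem_append, PySem.List.mem_pyRange_one]
    constructor
    · rintro (h | h)
      · exact hk x h
      · exact h
    · exact Or.inr
  · refine (pv_dedup_pairwise_idxOf (k ++ PySem.List.pyRange 0 256 1)).imp_of_mem ?_
    intro a b ha hb hab
    obtain ⟨ha0, ha1⟩ := hmemr a ha
    obtain ⟨hb0, hb1⟩ := hmemr b hb
    rw [pv_rank_eq k a ha0 ha1, pv_rank_eq k b hb0 hb1]
    exact_mod_cast hab

-- the two chunkings of the same flat list into 16 rows coincide
theorem pv_rows_eq (flat : List Int) :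
    (PySem.List.pyRange 0 256 16).map
        (fun i => PySem.List.slice flat (some i) (some (i + 16)))
      = (PySem.List.pyRange 0 16 1).map
        (fun r => PySem.List.slice flat (some (r * 16)) (some (r * 16 + 16))) := by
  have h1 : PySem.List.pyRange 0 256 16
      = [0, 16, 32, 48, 64, 80, 96, 112, 128, 144, 160, 176, 192, 208, 224, 240] := by decide
  have h2 : PySem.List.pyRange 0 16 1
      = [0, 1, 2, 3, 4, 5, 6, 7, 8, 9, 10, 11, 12, 13, 14, 15] := by decide
  rw [h1, h2]
  simp [List.map]

-- Dom gives the byte bounds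
theorem pv_bytes_bounds (key : String) (hd : Dom_prepare_key_bytes key) :
    ∀ x ∈ key.toList.map (fun c => (c.toNat : Int)), 0 ≤ x ∧ x < 256 := by
  intro x hx
  rcases List.mem_map.mp hx with ⟨c, hc, rfl⟩
  have := List.all_eq_true.mp hd c hc
  simp [pvDomChar] at this
  omega

-- ===== VERDICT (by name: the statement is the Claim_ definition above) =====
theorem prepare_key_bytes_spec : Claim_equal_prepare_key_bytes := by
  intro key hd
  show prepare_key_bytes key = prepare_key_bytes_alt key
  simp only [prepare_key_bytes, prepare_key_bytes_alt]
  rw [pv_flat_eq, ← pv_sorted_eq _ (pv_bytes_bounds key hd), pv_rows_eq]
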